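-- pv_equiv track=rewrite | github.com/Xarmian10/Agno-CRAG | crag_core.py | _prioritize_authoritative
-- ===== SOURCE A (Python) =====
-- from typing import Callable, Dict, List, Literal, Optional, Tuple
--
-- def _prioritize_authoritative(documents: List[Dict]) -> List[Dict]:
--     """Prioritize authoritative sources (Wikipedia, .edu, .gov, etc.)."""
--     authoritative = []
--     others = []
--
--     authoritative_domains = [
--         "wikipedia.org", ".edu", ".gov", ".org",
--         "scholar.google", "arxiv.org",
--     ]
--
--     for doc in documents:
--         url = doc.get("url", "").lower()
--         is_authoritative = any(domain in url for domain in authoritative_domains)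
--
--         if is_authoritative:
--             authoritative.append(doc)
--         else:
--             others.append(doc)
--
--     return authoritative + others
-- ===== SOURCE B (Python) =====
-- from typing import Dict, List
--
-- def _prioritize_authoritative(documents: List[Dict]) -> List[Dict]:
--     """Prioritize authoritative sources (Wikipedia, .edu, .gov, etc.)."""
--     authoritative_domains = [
--         "wikipedia.org", ".edu", ".gov", ".org",
--         "scholar.google", "arxiv.org",
--     ]
--     return sorted(
--         documents,
--         key=lambda doc: not any(
--             domain in doc.get("url", "").lower()
--             for domain in authoritative_domains
--         ),
--     )
-- ===== Notes on version B (the rewrite author's own statement) =====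
-- stated objective: idiomatic
-- what changed: Replaced the explicit two-bucket loop appending into authoritative/others lists with a single stable sorted() call keyed on the boolean 'not authoritative', which places authoritative documents first in original order.
import Mathlib
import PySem

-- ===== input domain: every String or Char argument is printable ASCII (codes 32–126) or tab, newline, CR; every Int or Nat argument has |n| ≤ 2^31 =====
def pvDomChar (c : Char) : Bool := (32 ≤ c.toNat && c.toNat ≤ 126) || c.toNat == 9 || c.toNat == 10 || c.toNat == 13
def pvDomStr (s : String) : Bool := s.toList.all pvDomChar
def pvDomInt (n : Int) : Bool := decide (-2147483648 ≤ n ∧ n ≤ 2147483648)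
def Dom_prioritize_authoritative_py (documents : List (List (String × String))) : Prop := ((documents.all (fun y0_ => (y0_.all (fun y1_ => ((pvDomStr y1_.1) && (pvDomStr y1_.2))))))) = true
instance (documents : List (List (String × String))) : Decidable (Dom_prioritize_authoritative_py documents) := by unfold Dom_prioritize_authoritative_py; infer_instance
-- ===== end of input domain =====

-- B replaces A's two-bucket partition loop with a single stable sort on a boolean
-- "not authoritative" key (idiomatic one-expression rewrite; same result, no speed claim).


-- ===== PORT A =====
-- shared by both Pythons verbatim: is_authoritative = any(domain in doc.get("url","").lower() for domain in authoritative_domains)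
def pvIsAuth (doc : List (String × String)) : Bool :=
  ["wikipedia.org", ".edu", ".gov", ".org", "scholar.google", "arxiv.org"].any
    (fun dom => PySem.Str.isIn dom (PySem.Str.lower (PySem.Dict.getD (PySem.Dict.mk doc) "url" "")))

def prioritize_authoritative_py (documents : List (List (String × String))) : List (List (String × String)) :=
  let acc := documents.foldl
    (fun (acc : List (List (String × String)) × List (List (String × String))) doc =>
      if pvIsAuth doc then (acc.1 ++ [doc], acc.2) else (acc.1, acc.2 ++ [doc]))
    ([], [])
  acc.1 ++ acc.2

-- ===== PORT B =====
def prioritize_authoritative_py_alt (documents : List (List (String × String))) : List (List (String × String)) :=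
  PySem.List.sorted documents (fun doc => !pvIsAuth doc) false

-- ===== PRECONDITION & SPEC =====
def Spec_prioritize_authoritative_py (documents : List (List (String × String))) (out : List (List (String × String))) : Prop := out = prioritize_authoritative_py_alt documents
instance (documents : List (List (String × String))) (out : List (List (String × String))) : Decidable (Spec_prioritize_authoritative_py documents out) := by unfold Spec_prioritize_authoritative_py; infer_instance

-- ===== CLAIM (what is proved, stated in full; the proofs are below) =====
def Claim_equal_prioritize_authoritative_py : Prop := ∀ (documents : List (List (String × String))), Dom_prioritize_authoritative_py documents → Spec_prioritize_authoritative_py documents (prioritize_authoritative_py documents)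

-- ===== LEMMAS AND PROOFS =====

-- A's loop: two append-accumulators collect the p-filter and the ¬p-filter, in order.
theorem pvFoldlPartition {α : Type} (p : α → Bool) (xs : List α) (F T : List α) :
    xs.foldl (fun (acc : List α × List α) x =>
        if p x then (acc.1 ++ [x], acc.2) else (acc.1, acc.2 ++ [x])) (F, T)
      = (F ++ xs.filter p, T ++ xs.filter (fun x => !p x)) := by
  induction xs generalizing F T with
  | nil => simp
  | cons x xs ih =>
    by_cases h : p x = true
    · simp [List.foldl_cons, h, ih]
    · simp only [Bool.not_eq_true] at h
      simp [List.foldl_cons, h, ih]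

-- inserting past a prefix the element does not go before
theorem pvInsertBy_append {α : Type} (before : α → α → Bool) (x : α) (F T : List α)
    (hF : ∀ y ∈ F, before x y = false) :
    PySem.List.insertBy before x (F ++ T) = F ++ PySem.List.insertBy before x T := by
  induction F with
  | nil => simp
  | cons f fs ih =>
    have hf : before x f = false := hF f (by simp)
    simp [PySem.List.insertBy, hf, ih (fun y hy => hF y (by simp [hy]))]

-- inserting before a block the element goes before every member of
theorem pvInsertBy_front {α : Type} (before : α → α → Bool) (x : α) (T : List α)
    (hT : ∀ y ∈ T, before x y = true) :
    PySem.List.insertBy before x T = x :: T := by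
  cases T with
  | nil => simp [PySem.List.insertBy]
  | cons t ts => simp [PySem.List.insertBy, hT t (by simp)]

-- B's sort: insertion-sorting by the boolean key ¬p is exactly the stable partition.
theorem pvSortPartition {α : Type} (p : α → Bool) (xs : List α) (F T : List α)
    (hF : ∀ y ∈ F, p y = true) (hT : ∀ y ∈ T, p y = false) :
    xs.foldl (fun acc x =>
        PySem.List.insertBy (fun a b => decide ((!p a) < (!p b))) x acc) (F ++ T)
      = F ++ xs.filter p ++ (T ++ xs.filter (fun x => !p x)) := by
  induction xs generalizing F T with
  | nil => simp
  | cons x xs ih =>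
    by_cases h : p x = true
    · have hF' : ∀ y ∈ F ++ [x], p y = true := by
        intro y hy
        rcases List.mem_append.1 hy with h' | h'
        · exact hF y h'
        · simp at h'; subst h'; exact h
      have step : PySem.List.insertBy (fun a b => decide ((!p a) < (!p b))) x (F ++ T)
          = (F ++ [x]) ++ T := by
        rw [pvInsertBy_append _ _ _ _ (fun y hy => by simp [h, hF y hy]),
            pvInsertBy_front _ _ _ (fun y hy => by simp [h, hT y hy])]
        simp
      rw [List.foldl_cons, step, ih (F ++ [x]) T hF' hT]
      simp [h, List.append_assoc]
    · simp only [Bool.not_eq_true] at h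
      have hT' : ∀ y ∈ T ++ [x], p y = false := by
        intro y hy
        rcases List.mem_append.1 hy with h' | h'
        · exact hT y h'
        · simp at h'; subst h'; exact h
      have step : PySem.List.insertBy (fun a b => decide ((!p a) < (!p b))) x (F ++ T)
          = F ++ (T ++ [x]) := by
        rw [PySem.List.insertBy_of_forall_not_before _ _ _ (fun y _ => by simp [h])]
        simp
      rw [List.foldl_cons, step, ih F (T ++ [x]) hF hT']
      simp [h, List.append_assoc]

-- ===== VERDICT (by name: the statement is the Claim_ definition above) =====
theorem prioritize_authoritative_py_spec : Claim_equal_prioritize_authoritative_py := by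
  intro documents _
  show prioritize_authoritative_py documents = prioritize_authoritative_py_alt documents
  unfold prioritize_authoritative_py prioritize_authoritative_py_alt
  rw [PySem.List.sorted_eq_foldl_insertBy]
  rw [pvFoldlPartition pvIsAuth documents [] []]
  rw [show ([] : List (List (String × String))) = [] ++ [] from rfl] 
  rw [pvSortPartition pvIsAuth documents [] [] (by simp) (by simp)]
  simp
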